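-- pv_equiv track=rewrite | github.com/laurajoyhutchins/pokemontology | pokemontology/ingest/meta_ingest.py | _extract_team_species
-- ===== SOURCE A (Python) =====
-- def _extract_team_species(log: str) -> list[str]:
--     """Extract all species declared in team preview (|poke| lines).
--
--     In VGC team preview, each player declares their full team with lines like:
--         |poke|p1|Koraidon, L50|
--         |poke|p2|Arceus-Fire, L50|
--     This gives the complete team composition including Pokemon not brought to battle.
--     If no |poke| lines are found, falls back to all switch events (pre- and in-battle).
--     """
--     species: list[str] = []
--     for line in log.splitlines():
--         if not line.startswith("|poke|"):
--             continue
--         parts = line.split("|")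
--         if len(parts) < 4:
--             continue
--         species_token = parts[3].strip()
--         species_raw = species_token.split(",")[0].strip()
--         if species_raw:
--             species.append(species_raw)
--
--     if species:
--         return species
--
--     # Fallback: parse all switch events regardless of turn number
--     for line in log.splitlines():
--         if not line.startswith("|switch|"):
--             continue
--         parts = line.split("|")
--         if len(parts) < 4:
--             continue
--         species_token = parts[3].strip()
--         species_raw = species_token.split(",")[0].strip()
--         if species_raw:
--             species.append(species_raw)
--
--     return species
-- ===== SOURCE B (Python) =====
-- def _parse_species(line, prefix):
--     """Return the species declared on `line` if it is a `prefix` event, else None."""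
--     if not line.startswith(prefix):
--         return None
--     parts = line.split("|")
--     if len(parts) < 4:
--         return None
--     raw = parts[3].strip().split(",")[0].strip()
--     return raw if raw else None
--
--
-- def _extract_team_species(log: str) -> list[str]:
--     poke = []
--     switch = []
--     for line in log.splitlines():
--         s = _parse_species(line, "|poke|")
--         if s is not None:
--             poke.append(s)
--         else:
--             s = _parse_species(line, "|switch|")
--             if s is not None:
--                 switch.append(s)
--     return poke if poke else switch
-- ===== Notes on version B (the rewrite author's own statement) =====
-- stated objective: alternative
-- what changed: Single pass over the lines maintaining both a |poke| and a |switch| accumulator (with a shared line-parsing helper), instead of A's two separate scans with an early return.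
import Mathlib
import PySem

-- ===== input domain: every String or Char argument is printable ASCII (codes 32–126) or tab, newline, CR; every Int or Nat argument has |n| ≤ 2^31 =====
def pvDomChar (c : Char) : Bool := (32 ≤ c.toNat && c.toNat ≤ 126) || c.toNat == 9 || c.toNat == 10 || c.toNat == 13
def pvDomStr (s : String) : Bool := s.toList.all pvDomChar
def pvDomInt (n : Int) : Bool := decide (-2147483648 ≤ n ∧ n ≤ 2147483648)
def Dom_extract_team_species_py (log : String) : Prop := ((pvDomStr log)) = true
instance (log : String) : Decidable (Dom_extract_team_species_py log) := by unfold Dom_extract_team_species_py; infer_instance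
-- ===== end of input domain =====

-- B replaces A's two scans (|poke| pass, early return, |switch| fallback pass) by ONE pass
-- keeping both accumulators, with a shared line-parsing helper; return value only, same order.

-- ===== PORT A =====
-- A's loop body for the first (|poke|) loop, transliterated step for step.
def pvStepPoke (acc : List String) (line : String) : List String :=
  if PySem.Str.startswith line "|poke|" then
    let parts := (PySem.Str.split? line "|").getD []
    if parts.length < 4 then acc
    else
      -- parts[3]: in range because length ≥ 4, so getD is exact here
      let species_token := PySem.Str.strip (parts.getD 3 "")
      -- split(",")[0]: splitOn with nonempty sep is never empty, index 0 exact
      let species_raw := PySem.Str.strip (((PySem.Str.split? species_token ",").getD []).getD 0 "")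
      if species_raw ≠ "" then acc ++ [species_raw] else acc
  else acc

-- A's loop body for the fallback (|switch|) loop.
def pvStepSwitch (acc : List String) (line : String) : List String :=
  if PySem.Str.startswith line "|switch|" then
    let parts := (PySem.Str.split? line "|").getD []
    if parts.length < 4 then acc
    else
      let species_token := PySem.Str.strip (parts.getD 3 "")
      let species_raw := PySem.Str.strip (((PySem.Str.split? species_token ",").getD []).getD 0 "")
      if species_raw ≠ "" then acc ++ [species_raw] else acc
  else acc

def extract_team_species_py (log : String) : List String :=
  let species := (PySem.Str.splitlines log).foldl pvStepPoke []
  if species ≠ [] then species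
  else (PySem.Str.splitlines log).foldl pvStepSwitch species

-- ===== PORT B =====
-- B's helper _parse_species(line, prefix), transliterated.
def pvParseSpecies (line pre : String) : Option String :=
  if PySem.Str.startswith line pre then
    let parts := (PySem.Str.split? line "|").getD []
    if parts.length < 4 then none
    else
      let raw := PySem.Str.strip (((PySem.Str.split? (PySem.Str.strip (parts.getD 3 "")) ",").getD []).getD 0 "")
      if raw ≠ "" then some raw else none
  else none

def extract_team_species_py_alt (log : String) : List String :=
  let p := (PySem.Str.splitlines log).foldl
    (fun (acc : List String × List String) line =>
      match pvParseSpecies line "|poke|" with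
      | some s => (acc.1 ++ [s], acc.2)
      | none =>
        match pvParseSpecies line "|switch|" with
        | some s => (acc.1, acc.2 ++ [s])
        | none => acc) ([], [])
  if p.1 = [] then p.2 else p.1

-- ===== PRECONDITION & SPEC =====
def Spec_extract_team_species_py (log : String) (out : List String) : Prop := out = extract_team_species_py_alt log
instance (log : String) (out : List String) : Decidable (Spec_extract_team_species_py log out) := by unfold Spec_extract_team_species_py; infer_instance

-- ===== CLAIM (what is proved, stated in full; the proofs are below) =====
def Claim_equal_extract_team_species_py : Prop := ∀ (log : String), Dom_extract_team_species_py log → Spec_extract_team_species_py log (extract_team_species_py log)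

-- ===== LEMMAS AND PROOFS =====

-- A line cannot start with both "|poke|" and "|switch|".
theorem pv_not_both (line : String)
    (h1 : PySem.Str.startswith line "|poke|" = true)
    (h2 : PySem.Str.startswith line "|switch|" = true) : False := by
  simp only [PySem.Str.startswith_eq] at h1 h2
  rw [PySem.Chars.startswith_iff] at h1 h2
  obtain ⟨t1, e1⟩ := h1
  obtain ⟨t2, e2⟩ := h2
  rw [← e2] at e1
  simp at e1

-- B's step is A's two steps run componentwise.
theorem pv_step (line : String) (a b : List String) :
    (match pvParseSpecies line "|poke|" with
      | some s => (a ++ [s], b)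
      | none =>
        match pvParseSpecies line "|switch|" with
        | some s => (a, b ++ [s])
        | none => (a, b)) = (pvStepPoke a line, pvStepSwitch b line) := by
  unfold pvParseSpecies pvStepPoke pvStepSwitch
  cases hp : PySem.Str.startswith line "|poke|" <;>
    cases hs : PySem.Str.startswith line "|switch|"
  · simp
  · simp only [if_true, if_false, Bool.false_eq_true]
    split_ifs <;> simp
  · simp only [if_true, if_false, Bool.false_eq_true]
    split_ifs <;> simp
  · exact (pv_not_both line hp hs).elim

-- The pair fold computes both of A's folds at once.
theorem pv_fold (lines : List String) (a b : List String) :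
    lines.foldl
      (fun (acc : List String × List String) line =>
        match pvParseSpecies line "|poke|" with
        | some s => (acc.1 ++ [s], acc.2)
        | none =>
          match pvParseSpecies line "|switch|" with
          | some s => (acc.1, acc.2 ++ [s])
          | none => acc) (a, b)
      = (lines.foldl pvStepPoke a, lines.foldl pvStepSwitch b) := by
  induction lines generalizing a b with
  | nil => rfl
  | cons l ls ih =>
    simp only [List.foldl_cons]
    rw [show (match pvParseSpecies l "|poke|" with
        | some s => ((a, b).1 ++ [s], (a, b).2)
        | none =>
          match pvParseSpecies l "|switch|" with
          | some s => ((a, b).1, (a, b).2 ++ [s])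
          | none => (a, b)) = (pvStepPoke a l, pvStepSwitch b l) from pv_step l a b]
    exact ih _ _

-- ===== VERDICT (by name: the statement is the Claim_ definition above) =====
theorem extract_team_species_py_spec : Claim_equal_extract_team_species_py := by
  intro log _
  unfold Spec_extract_team_species_py extract_team_species_py extract_team_species_py_alt
  rw [pv_fold]
  by_cases h : (PySem.Str.splitlines log).foldl pvStepPoke [] = []
  · simp [h]
  · simp [h]
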